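-- pv_equiv track=rewrite | github.com/minnseong/Algorithm | programmers/Test/LINE_Q2.py | solution
-- ===== SOURCE A (Python) =====
-- from itertools import combinations
--
-- def solution(sentence, n):
--
--     result = 0
--     possible_key = dict()
--     keys = set()
--
--     for s in sentence:
--         tmp = set()
--         for key in set(list(s)):
--             if key == " ":
--                 continue
--             elif 65 <= ord(key) <= 90:
--                 tmp.add("shift")
--                 tmp.add(key.lower())
--             else:
--                 tmp.add(key)
--         possible_key[s] = tmp
--         keys.update(tmp)
--
--     score_dic = dict()
--     for st in sentence:
--         score = 0
--         for s in st:
--             if 65 <= ord(s) <= 90: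
--                 score += 2
--             else:
--                 score += 1
--         score_dic[st] = score
--
--     for combi in set(combinations(keys, n)):
--         score = 0
--         for k, v in possible_key.items():
--             if set(combi) & set(v) == set(v):
--                 score += score_dic[k]
--         result = max(score, result)
--
--     return result
-- ===== SOURCE B (Python) =====
-- from itertools import combinations
--
--
-- def solution(sentence, n):
--     # Enumerate subsets of distinct sentences instead of key combinations.
--     uniq = list(dict.fromkeys(sentence))
--     info = []
--     for s in uniq:
--         keys = set()
--         for c in s:
--             if c == " ":
--                 continue
--             if c.isupper():
--                 keys.add("shift")
--             keys.add(c.lower())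
--         info.append((keys, len(s) + sum(1 for c in s if c.isupper())))
--     all_keys = set()
--     for keys, _ in info:
--         all_keys |= keys
--     if len(all_keys) < n:
--         return 0
--     best = 0
--     for r in range(len(info) + 1):
--         for subset in combinations(info, r):
--             union = set()
--             total = 0
--             for keys, sc in subset:
--                 union |= keys
--                 total += sc
--             if len(union) <= n:
--                 best = max(best, total)
--     return best
-- ===== Notes on version B (the rewrite author's own statement) =====
-- stated objective: alternative
-- what changed: B enumerates subsets of the distinct sentences and keeps the best total score whose union of required keys fits in n keys (with A's distinct-keys < n guard), instead of A's enumeration of all n-key combinations with an inner per-sentence feasibility scan.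
import Mathlib
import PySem

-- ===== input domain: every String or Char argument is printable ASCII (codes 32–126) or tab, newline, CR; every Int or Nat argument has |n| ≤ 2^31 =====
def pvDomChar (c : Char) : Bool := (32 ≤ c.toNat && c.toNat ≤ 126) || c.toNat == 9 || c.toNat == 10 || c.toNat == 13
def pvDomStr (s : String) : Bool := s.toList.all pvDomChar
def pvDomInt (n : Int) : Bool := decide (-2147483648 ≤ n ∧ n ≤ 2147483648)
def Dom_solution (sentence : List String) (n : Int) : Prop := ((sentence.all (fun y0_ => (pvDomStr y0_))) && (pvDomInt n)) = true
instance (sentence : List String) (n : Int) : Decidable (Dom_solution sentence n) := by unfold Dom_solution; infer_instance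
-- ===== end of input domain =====

-- B replaces A's search over n-key combinations by a search over subsets of the distinct
-- sentences (objective: alternative decomposition, same exact value).

-- ===== PORT A =====
-- helper: body of A's inner 'tmp' loop
def solA_step (tmp : PySem.Set String) (key : Char) : PySem.Set String :=
  if key = ' ' then tmp
  else if 65 ≤ key.toNat ∧ key.toNat ≤ 90 then
    PySem.Set.add (PySem.Set.add tmp "shift") (PySem.Chars.lowerChar key).toString
  else PySem.Set.add tmp key.toString

-- helper: the required key set of one sentence (A's 'tmp' loop over set(list(s)))
def solA_tmp (s : String) : PySem.Set String :=
  (PySem.Set.ofList s.toList).foldl solA_step PySem.Set.empty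

-- helper: A's score loop for one sentence
def solA_score (st : String) : Int :=
  st.toList.foldl (fun score s => if 65 ≤ s.toNat ∧ s.toNat ≤ 90 then score + 2 else score + 1) 0

def solution (sentence : List String) (n : Int) : Int :=
  let pks := sentence.foldl
      (fun (acc : PySem.Dict String (PySem.Set String) × PySem.Set String) s =>
        (acc.1.insert s (solA_tmp s), PySem.Set.update acc.2 (solA_tmp s)))
      (PySem.Dict.empty, PySem.Set.empty)
  let possible_key := pks.1
  let keys := pks.2
  let score_dic : PySem.Dict String Int :=
    sentence.foldl (fun d st => d.insert st (solA_score st)) PySem.Dict.empty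
  (PySem.Set.ofList (PySem.List.combinations keys n.toNat)).foldl
    (fun result combi =>
      let score := possible_key.items.foldl
        (fun score kv =>
          if PySem.Set.equal (PySem.Set.inter (PySem.Set.ofList combi) kv.2) kv.2
          then score + score_dic.getD kv.1 0 else score) 0
      max score result) 0

-- ===== PORT B =====
-- helper: body of B's per-character loop
def solB_step (keys : PySem.Set String) (c : Char) : PySem.Set String :=
  if c = ' ' then keys
  else PySem.Set.add (if PySem.Chars.isupper c then PySem.Set.add keys "shift" else keys)
         (PySem.Chars.lowerChar c).toString

-- helper: required key set of one sentence
def solB_keys (s : String) : PySem.Set String :=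
  s.toList.foldl solB_step PySem.Set.empty

-- helper: B's score: len(s) + number of uppercase characters
def solB_score (s : String) : Int :=
  (s.toList.length : Int) + s.toList.foldl (fun t c => if PySem.Chars.isupper c then t + 1 else t) 0

def solution_alt (sentence : List String) (n : Int) : Int :=
  let info := (PySem.List.dedup sentence).map (fun s => (solB_keys s, solB_score s))
  let allKeys := info.foldl (fun a kv => PySem.Set.union a kv.1) PySem.Set.empty
  if (allKeys.length : Int) < n then 0
  else
    (List.range (info.length + 1)).foldl
      (fun best r =>
        (PySem.List.combinations info r).foldl
          (fun best subset =>
            let ut := subset.foldl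
              (fun (p : PySem.Set String × Int) kv => (PySem.Set.union p.1 kv.1, p.2 + kv.2))
              (PySem.Set.empty, 0)
            if (ut.1.length : Int) ≤ n then max best ut.2 else best)
          best)
      0

-- ===== PRECONDITION & SPEC =====
-- A raises ValueError (combinations with negative r) for n < 0; Pre_ excludes exactly that.
def Pre_solution (sentence : List String) (n : Int) : Prop := 0 ≤ n
instance (sentence : List String) (n : Int) : Decidable (Pre_solution sentence n) := by
  unfold Pre_solution; infer_instance

def pvWitness_solution : List String × Int := (["Ab c"], 2)

def Spec_solution (sentence : List String) (n : Int) (out : Int) : Prop := out = solution_alt sentence n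
instance (sentence : List String) (n : Int) (out : Int) : Decidable (Spec_solution sentence n out) := by
  unfold Spec_solution; infer_instance

-- ===== CLAIM (what is proved, stated in full; the proofs are below) =====
def Claim_equal_solution : Prop := ∀ (sentence : List String) (n : Int), Dom_solution sentence n → Pre_solution sentence n → Spec_solution sentence n (solution sentence n)

-- ===== LEMMAS AND PROOFS =====

-- spec-level description of membership in the key set of a sentence
def RMem (s : String) (x : String) : Prop :=
  ∃ c ∈ s.toList, c ≠ ' ' ∧
    (x = (PySem.Chars.lowerChar c).toString ∨ ((65 ≤ c.toNat ∧ c.toNat ≤ 90) ∧ x = "shift"))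

theorem charle_iff (d c : Char) : (d ≤ c) ↔ d.toNat ≤ c.toNat := by
  rw [Char.le_def, UInt32.le_iff_toNat_le]
  exact Iff.rfl

theorem isupper_iff (c : Char) : PySem.Chars.isupper c = true ↔ (65 ≤ c.toNat ∧ c.toNat ≤ 90) := by
  unfold PySem.Chars.isupper
  rw [Bool.and_eq_true, decide_eq_true_eq, decide_eq_true_eq, charle_iff, charle_iff]
  have hA : ('A' : Char).toNat = 65 := rfl
  have hZ : ('Z' : Char).toNat = 90 := rfl
  rw [hA, hZ]

theorem lower_eq_self {c : Char} (hup : ¬ (65 ≤ c.toNat ∧ c.toNat ≤ 90)) :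
    PySem.Chars.lowerChar c = c := by
  have hni : ¬ PySem.Chars.isupper c = true := fun h => hup ((isupper_iff c).1 h)
  unfold PySem.Chars.lowerChar
  rw [if_neg hni]

theorem mem_stepA (tmp : PySem.Set String) (c : Char) (x : String) :
    x ∈ solA_step tmp c
      ↔ x ∈ tmp ∨ (c ≠ ' ' ∧
          (x = (PySem.Chars.lowerChar c).toString ∨ ((65 ≤ c.toNat ∧ c.toNat ≤ 90) ∧ x = "shift"))) := by
  unfold solA_step
  by_cases hsp : c = ' '
  · simp [hsp]
  · by_cases hup : 65 ≤ c.toNat ∧ c.toNat ≤ 90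
    · rw [if_neg hsp, if_pos hup, PySem.Set.mem_add, PySem.Set.mem_add]
      constructor
      · rintro ((h | h) | h)
        · exact Or.inl h
        · exact Or.inr ⟨hsp, Or.inr ⟨hup, h⟩⟩
        · exact Or.inr ⟨hsp, Or.inl h⟩
      · rintro (h | ⟨-, (h | ⟨-, h⟩)⟩)
        · exact Or.inl (Or.inl h)
        · exact Or.inr h
        · exact Or.inl (Or.inr h)
    · rw [if_neg hsp, if_neg hup, PySem.Set.mem_add, lower_eq_self hup]
      constructor
      · rintro (h | h)
        · exact Or.inl h
        · exact Or.inr ⟨hsp, Or.inl h⟩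
      · rintro (h | ⟨-, (h | ⟨hup', -⟩)⟩)
        · exact Or.inl h
        · exact Or.inr h
        · exact absurd hup' hup

theorem mem_stepB (ks : PySem.Set String) (c : Char) (x : String) :
    x ∈ solB_step ks c
      ↔ x ∈ ks ∨ (c ≠ ' ' ∧
          (x = (PySem.Chars.lowerChar c).toString ∨ ((65 ≤ c.toNat ∧ c.toNat ≤ 90) ∧ x = "shift"))) := by
  unfold solB_step
  by_cases hsp : c = ' '
  · simp [hsp]
  · by_cases hb : PySem.Chars.isupper c = true
    · have hup : 65 ≤ c.toNat ∧ c.toNat ≤ 90 := (isupper_iff c).1 hb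
      rw [if_neg hsp, if_pos hb, PySem.Set.mem_add, PySem.Set.mem_add]
      constructor
      · rintro ((h | h) | h)
        · exact Or.inl h
        · exact Or.inr ⟨hsp, Or.inr ⟨hup, h⟩⟩
        · exact Or.inr ⟨hsp, Or.inl h⟩
      · rintro (h | ⟨-, (h | ⟨-, h⟩)⟩)
        · exact Or.inl (Or.inl h)
        · exact Or.inr h
        · exact Or.inl (Or.inr h)
    · have hup : ¬ (65 ≤ c.toNat ∧ c.toNat ≤ 90) := fun h => hb ((isupper_iff c).2 h)
      rw [if_neg hsp, if_neg hb, PySem.Set.mem_add, lower_eq_self hup]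
      constructor
      · rintro (h | h)
        · exact Or.inl h
        · exact Or.inr ⟨hsp, Or.inl h⟩
      · rintro (h | ⟨-, (h | ⟨hup', -⟩)⟩)
        · exact Or.inl h
        · exact Or.inr h
        · exact absurd hup' hup

theorem mem_foldA (l : List Char) (init : PySem.Set String) (x : String) :
    x ∈ l.foldl solA_step init
      ↔ x ∈ init ∨ ∃ c ∈ l, c ≠ ' ' ∧
          (x = (PySem.Chars.lowerChar c).toString ∨ ((65 ≤ c.toNat ∧ c.toNat ≤ 90) ∧ x = "shift")) := by
  induction l generalizing init with
  | nil => simp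
  | cons c l ih =>
    rw [List.foldl_cons, ih, mem_stepA]
    constructor
    · rintro ((h | h) | ⟨d, hd, h⟩)
      · exact Or.inl h
      · exact Or.inr ⟨c, by simp, h⟩
      · exact Or.inr ⟨d, by simp [hd], h⟩
    · rintro (h | ⟨d, hd, h⟩)
      · exact Or.inl (Or.inl h)
      · rcases List.mem_cons.1 hd with rfl | hd'
        · exact Or.inl (Or.inr h)
        · exact Or.inr ⟨d, hd', h⟩

theorem mem_foldB (l : List Char) (init : PySem.Set String) (x : String) :
    x ∈ l.foldl solB_step init
      ↔ x ∈ init ∨ ∃ c ∈ l, c ≠ ' ' ∧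
          (x = (PySem.Chars.lowerChar c).toString ∨ ((65 ≤ c.toNat ∧ c.toNat ≤ 90) ∧ x = "shift")) := by
  induction l generalizing init with
  | nil => simp
  | cons c l ih =>
    rw [List.foldl_cons, ih, mem_stepB]
    constructor
    · rintro ((h | h) | ⟨d, hd, h⟩)
      · exact Or.inl h
      · exact Or.inr ⟨c, by simp, h⟩
      · exact Or.inr ⟨d, by simp [hd], h⟩
    · rintro (h | ⟨d, hd, h⟩)
      · exact Or.inl (Or.inl h)
      · rcases List.mem_cons.1 hd with rfl | hd'
        · exact Or.inl (Or.inr h)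
        · exact Or.inr ⟨d, hd', h⟩

theorem mem_solA_tmp (s : String) (x : String) : x ∈ solA_tmp s ↔ RMem s x := by
  unfold solA_tmp RMem
  rw [mem_foldA]
  have he : x ∈ (PySem.Set.empty : PySem.Set String) ↔ False := by simp [PySem.Set.empty]
  rw [he, false_or]
  constructor
  · rintro ⟨c, hc, h⟩; exact ⟨c, (PySem.Set.mem_ofList _ _).1 hc, h⟩
  · rintro ⟨c, hc, h⟩; exact ⟨c, (PySem.Set.mem_ofList _ _).2 hc, h⟩

theorem mem_solB_keys (s : String) (x : String) : x ∈ solB_keys s ↔ RMem s x := by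
  unfold solB_keys RMem
  rw [mem_foldB]
  have he : x ∈ (PySem.Set.empty : PySem.Set String) ↔ False := by simp [PySem.Set.empty]
  rw [he, false_or]

-- scores agree and are nonnegative
theorem scoreA_aux (l : List Char) (a : Int) :
    l.foldl (fun score s => if 65 ≤ s.toNat ∧ s.toNat ≤ 90 then score + 2 else score + 1) a
      = a + l.length + (l.countP (fun c => PySem.Chars.isupper c) : Int) := by
  induction l generalizing a with
  | nil => simp
  | cons c l ih =>
    by_cases hup : 65 ≤ c.toNat ∧ c.toNat ≤ 90
    · have h2 : PySem.Chars.isupper c = true := (isupper_iff c).2 hup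
      simp [hup, ih, h2]
      omega
    · have h2 : ¬ PySem.Chars.isupper c = true := fun h => hup ((isupper_iff c).1 h)
      simp [hup, ih, h2]
      omega

theorem scoreB_aux (l : List Char) (a : Int) :
    l.foldl (fun t c => if PySem.Chars.isupper c then t + 1 else t) a
      = a + (l.countP (fun c => PySem.Chars.isupper c) : Int) := by
  induction l generalizing a with
  | nil => simp
  | cons c l ih =>
    by_cases h : PySem.Chars.isupper c
    · simp [h, ih]
      omega
    · simp [h, ih]

theorem score_eq (s : String) : solB_score s = solA_score s := by
  unfold solA_score solB_score
  rw [scoreA_aux, scoreB_aux]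
  omega

theorem score_nonneg (s : String) : 0 ≤ solA_score s := by
  unfold solA_score
  rw [scoreA_aux]
  positivity

-- union of required key sets over a list of sentences (B's running union, and its spec)
def UK (S : List String) : PySem.Set String :=
  S.foldl (fun u s => PySem.Set.union u (solB_keys s)) PySem.Set.empty

theorem mem_foldl_union (S : List String) (init : PySem.Set String) (x : String) :
    x ∈ S.foldl (fun u s => PySem.Set.union u (solB_keys s)) init
      ↔ x ∈ init ∨ ∃ s ∈ S, RMem s x := by
  induction S generalizing init with
  | nil => simp
  | cons s S ih =>
    simp only [List.foldl_cons, ih, PySem.Set.mem_union, mem_solB_keys]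
    constructor
    · rintro ((h | h) | ⟨t, ht, h⟩)
      · exact Or.inl h
      · exact Or.inr ⟨s, by simp, h⟩
      · exact Or.inr ⟨t, by simp [ht], h⟩
    · rintro (h | ⟨t, ht, h⟩)
      · exact Or.inl (Or.inl h)
      · rcases List.mem_cons.1 ht with rfl | h1
        · exact Or.inl (Or.inr h)
        · exact Or.inr ⟨t, h1, h⟩

theorem mem_UK (S : List String) (x : String) : x ∈ UK S ↔ ∃ s ∈ S, RMem s x := by
  unfold UK
  rw [mem_foldl_union]
  have he : x ∈ (PySem.Set.empty : PySem.Set String) ↔ False := by simp [PySem.Set.empty]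
  rw [he, false_or]

theorem nodup_UK (S : List String) : (UK S).Nodup := by
  unfold UK
  generalize h : (PySem.Set.empty : PySem.Set String) = init
  have hi : List.Nodup init := by rw [← h]; simp [PySem.Set.empty]
  clear h
  induction S generalizing init with
  | nil => simpa using hi
  | cons s S ih => exact ih _ (PySem.Set.nodup_union _ _ hi)

-- A's running 'keys' set
def Kset (sentence : List String) : PySem.Set String :=
  sentence.foldl (fun ks s => PySem.Set.update ks (solA_tmp s)) PySem.Set.empty

theorem mem_foldl_updateA (l : List String) (init : PySem.Set String) (x : String) :
    x ∈ l.foldl (fun ks s => PySem.Set.update ks (solA_tmp s)) init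
      ↔ x ∈ init ∨ ∃ s ∈ l, RMem s x := by
  induction l generalizing init with
  | nil => simp
  | cons s l ih =>
    simp only [List.foldl_cons, ih, PySem.Set.mem_update, mem_solA_tmp]
    constructor
    · rintro ((h | h) | ⟨t, ht, h⟩)
      · exact Or.inl h
      · exact Or.inr ⟨s, by simp, h⟩
      · exact Or.inr ⟨t, by simp [ht], h⟩
    · rintro (h | ⟨t, ht, h⟩)
      · exact Or.inl (Or.inl h)
      · rcases List.mem_cons.1 ht with rfl | h1
        · exact Or.inl (Or.inr h)
        · exact Or.inr ⟨t, h1, h⟩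

theorem mem_Kset (sentence : List String) (x : String) :
    x ∈ Kset sentence ↔ ∃ s ∈ sentence, RMem s x := by
  unfold Kset
  rw [mem_foldl_updateA]
  have he : x ∈ (PySem.Set.empty : PySem.Set String) ↔ False := by simp [PySem.Set.empty]
  rw [he, false_or]

theorem nodup_Kset (sentence : List String) : (Kset sentence).Nodup := by
  unfold Kset
  generalize h : (PySem.Set.empty : PySem.Set String) = init
  have hi : List.Nodup init := by rw [← h]; simp [PySem.Set.empty]
  clear h
  induction sentence generalizing init with
  | nil => simpa using hi
  | cons s l ih => exact ih _ (PySem.Set.nodup_update _ _ hi)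

-- dict folded with a function of the key: lookup
theorem get?_foldl_insert_f {ν : Type} (f : String → ν) (l : List String) (d : PySem.Dict String ν) (k : String) :
    (l.foldl (fun d s => d.insert s (f s)) d).get? k = if k ∈ l then some (f k) else d.get? k := by
  induction l generalizing d with
  | nil => simp
  | cons s l ih =>
    simp only [List.foldl_cons, ih]
    by_cases hk : k ∈ l
    · simp [hk]
    · by_cases he : k = s
      · subst he; simp [hk, PySem.Dict.get?_insert]
      · simp [hk, he, PySem.Dict.get?_insert]

theorem getD_foldl_insert_f {ν : Type} (f : String → ν) (l : List String) (k : String) (dflt : ν)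
    (hk : k ∈ l) :
    (l.foldl (fun d s => d.insert s (f s)) PySem.Dict.empty).getD k dflt = f k := by
  rw [PySem.Dict.getD_eq_get?_getD, get?_foldl_insert_f]
  simp [hk]

-- A's possible_key dict: its items are the distinct sentences paired with their key sets
theorem items_pk (sentence : List String) :
    (sentence.foldl (fun d s => d.insert s (solA_tmp s)) PySem.Dict.empty).items
      = (PySem.Set.ofList sentence).map (fun s => (s, solA_tmp s)) := by
  have hnd : (sentence.foldl (fun d s => d.insert s (solA_tmp s)) PySem.Dict.empty).keys.Nodup :=
    PySem.Dict.nodup_keys_foldl_insert sentence (fun _ s => solA_tmp s) PySem.Dict.empty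
      (by simp)
  rw [PySem.Dict.items_eq_map_keys _ hnd PySem.Set.empty]
  rw [PySem.Dict.keys_foldl_insert sentence (fun _ s => solA_tmp s) PySem.Dict.empty]
  rw [PySem.Dict.keys_empty, PySem.Set.update_nil_left]
  apply List.map_congr_left
  intro k hk
  have hks : k ∈ sentence := (PySem.Set.mem_ofList _ _).1 hk
  rw [getD_foldl_insert_f _ _ _ _ hks]

-- nodup-subset length bound
theorem nodup_length_le {α : Type} [DecidableEq α] {l l' : List α} (hn : l.Nodup) (h : l ⊆ l') :
    l.length ≤ l'.length := by
  calc l.length = l.toFinset.card := (List.toFinset_card_of_nodup hn).symm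
    _ ≤ l'.toFinset.card := Finset.card_le_card (fun a ha => by
        simp only [List.mem_toFinset] at *
        exact h ha)
    _ ≤ l'.length := List.toFinset_card_le l'

-- extend a sublist to a given length
theorem sublist_extend {α : Type} {f l : List α} (h : f.Sublist l) :
    ∀ m, f.length ≤ m → m ≤ l.length → ∃ t, f.Sublist t ∧ t.Sublist l ∧ t.length = m := by
  induction h with
  | slnil =>
    intro m h1 h2
    simp at h2
    exact ⟨[], by simp, by simp, by omega⟩
  | @cons l₁ l₂ a h ih =>
    intro m h1 h2
    by_cases hm : m ≤ l₂.length
    · obtain ⟨t, ht1, ht2, ht3⟩ := ih m h1 hm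
      exact ⟨t, ht1, ht2.cons a, ht3⟩
    · simp at h2
      have hll := h.length_le
      obtain ⟨t, ht1, ht2, ht3⟩ := ih (m - 1) (by omega) (by omega)
      refine ⟨a :: t, ht1.cons a, ht2.cons₂ a, ?_⟩
      simp [ht3]
      omega
  | @cons₂ l₁ l₂ a h ih =>
    intro m h1 h2
    simp at h1 h2
    obtain ⟨t, ht1, ht2, ht3⟩ := ih (m - 1) (by omega) (by omega)
    refine ⟨a :: t, ht1.cons₂ a, ht2.cons₂ a, ?_⟩
    simp [ht3]
    omega

-- max-fold machinery
theorem foldl_max_le {α : Type} (l : List α) (g : α → Int) (b c : Int)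
    (hb : b ≤ c) (h : ∀ x ∈ l, g x ≤ c) :
    l.foldl (fun acc x => max acc (g x)) b ≤ c := by
  induction l generalizing b with
  | nil => simpa using hb
  | cons x l ih =>
    simp only [List.foldl_cons]
    exact ih _ (max_le hb (h x (by simp))) (fun y hy => h y (by simp [hy]))

theorem cmax_ge_init {α : Type} (l : List α) (p : α → Prop) [DecidablePred p] (g : α → Int) (b : Int) :
    b ≤ l.foldl (fun acc x => if p x then max acc (g x) else acc) b := by
  induction l generalizing b with
  | nil => simp
  | cons x l ih =>
    simp only [List.foldl_cons]
    by_cases hx : p x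
    · rw [if_pos hx]
      exact le_trans (le_max_left _ _) (ih _)
    · rw [if_neg hx]
      exact ih b

theorem cmax_ge_mem {α : Type} (l : List α) (p : α → Prop) [DecidablePred p] (g : α → Int) (b : Int)
    {x : α} (hx : x ∈ l) (hp : p x) :
    g x ≤ l.foldl (fun acc x => if p x then max acc (g x) else acc) b := by
  induction l generalizing b with
  | nil => simp at hx
  | cons y l ih =>
    simp only [List.foldl_cons]
    rcases List.mem_cons.1 hx with rfl | h
    · rw [if_pos hp]
      exact le_trans (le_max_right _ _) (cmax_ge_init _ _ _ _)
    · by_cases hy : p y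
      · rw [if_pos hy]; exact ih _ h
      · rw [if_neg hy]; exact ih _ h

theorem cmax_le {α : Type} (l : List α) (p : α → Prop) [DecidablePred p] (g : α → Int) (b c : Int)
    (hb : b ≤ c) (h : ∀ x ∈ l, p x → g x ≤ c) :
    l.foldl (fun acc x => if p x then max acc (g x) else acc) b ≤ c := by
  induction l generalizing b with
  | nil => simpa using hb
  | cons x l ih =>
    simp only [List.foldl_cons]
    by_cases hx : p x
    · rw [if_pos hx]
      exact ih _ (max_le hb (h x (by simp) hx)) (fun y hy hpy => h y (by simp [hy]) hpy)
    · rw [if_neg hx]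
      exact ih b hb (fun y hy hpy => h y (by simp [hy]) hpy)

def tot (S : List String) : Int := (S.map solA_score).sum

theorem tot_mono {S T : List String} (h : S.Sublist T) : tot S ≤ tot T := by
  unfold tot
  exact (h.map solA_score).sum_le_sum (by
    intro a ha
    obtain ⟨s, _, rfl⟩ := List.mem_map.1 ha
    exact score_nonneg s)

-- A's feasibility test for one sentence against a chosen key tuple
def pA (combi : List String) (s : String) : Bool :=
  PySem.Set.equal (PySem.Set.inter (PySem.Set.ofList combi) (solA_tmp s)) (solA_tmp s)

theorem pA_iff (combi : List String) (s : String) :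
    pA combi s = true ↔ ∀ x ∈ solA_tmp s, x ∈ combi := by
  unfold pA
  rw [PySem.Set.equal_iff]
  constructor
  · intro h x hx
    have h2 := (h x).2 hx
    exact (PySem.Set.mem_ofList _ _).1 ((PySem.Set.mem_inter _ _ _).1 h2).1
  · intro h x
    constructor
    · intro hx
      exact ((PySem.Set.mem_inter _ _ _).1 hx).2
    · intro hx
      exact (PySem.Set.mem_inter _ _ _).2 ⟨(PySem.Set.mem_ofList _ _).2 (h x hx), hx⟩

-- A's total score for one key tuple
def AF (sentence : List String) (combi : List String) : Int :=
  tot ((PySem.Set.ofList sentence).filter (fun s => pA combi s))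

theorem inner_eval (sentence : List String) (combi : List String) :
    ((sentence.foldl (fun d s => d.insert s (solA_tmp s)) PySem.Dict.empty).items).foldl
        (fun score kv =>
          if PySem.Set.equal (PySem.Set.inter (PySem.Set.ofList combi) kv.2) kv.2
          then score + (sentence.foldl (fun d st => d.insert st (solA_score st)) PySem.Dict.empty).getD kv.1 0
          else score) 0
      = AF sentence combi := by
  simp only [items_pk, List.foldl_map]
  have h1 : ∀ s ∈ PySem.Set.ofList sentence, ∀ (score : Int),
      (if PySem.Set.equal (PySem.Set.inter (PySem.Set.ofList combi) (solA_tmp s)) (solA_tmp s)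
        then score + (sentence.foldl (fun d st => d.insert st (solA_score st)) PySem.Dict.empty).getD s 0
        else score)
      = (if pA combi s then score + solA_score s else score) := by
    intro s hs score
    unfold pA
    by_cases hc : PySem.Set.equal (PySem.Set.inter (PySem.Set.ofList combi) (solA_tmp s)) (solA_tmp s) = true
    · rw [if_pos hc, if_pos hc, getD_foldl_insert_f _ _ _ _ ((PySem.Set.mem_ofList _ _).1 hs)]
    · rw [if_neg hc, if_neg hc]
  rw [PySem.List.foldl_congr_mem' _ _ _ _ h1]
  rw [PySem.List.foldl_if_eq_foldl_filter (pA combi) (fun (acc : Int) s => acc + solA_score s)]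
  rw [PySem.List.foldl_add]
  unfold AF tot
  simp

theorem A_eval (sentence : List String) (n : Int) :
    solution sentence n
      = (PySem.Set.ofList (PySem.List.combinations (Kset sentence) n.toNat)).foldl
          (fun acc combi => max acc (AF sentence combi)) 0 := by
  have key : sentence.foldl
      (fun (acc : PySem.Dict String (PySem.Set String) × PySem.Set String) s =>
        (acc.1.insert s (solA_tmp s), PySem.Set.update acc.2 (solA_tmp s)))
      (PySem.Dict.empty, PySem.Set.empty)
      = (sentence.foldl (fun d s => d.insert s (solA_tmp s)) PySem.Dict.empty,
         sentence.foldl (fun ks s => PySem.Set.update ks (solA_tmp s)) PySem.Set.empty) :=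
    PySem.List.foldl_prod_mk
      (f := fun (d : PySem.Dict String (PySem.Set String)) s => d.insert s (solA_tmp s))
      (g := fun (ks : PySem.Set String) s => PySem.Set.update ks (solA_tmp s)) _ _ _
  simp only [solution, key]
  refine PySem.List.foldl_congr_mem' _ _ _ _ ?_
  intro combi _ acc
  rw [inner_eval sentence combi, max_comm]

-- all subsets of the distinct sentences (what B's nested loops range over)
def allsubs (sentence : List String) : List (List String) :=
  (List.range ((PySem.Set.ofList sentence).length + 1)).flatMap
    (fun r => PySem.List.combinations (PySem.Set.ofList sentence) r)

theorem mem_allsubs (sentence : List String) (S : List String) :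
    S ∈ allsubs sentence ↔ S.Sublist (PySem.Set.ofList sentence) := by
  unfold allsubs
  rw [List.mem_flatMap]
  constructor
  · rintro ⟨r, _, hS⟩
    exact ((PySem.List.mem_combinations_iff _ _ _).1 hS).1
  · intro h
    refine ⟨S.length, ?_, (PySem.List.mem_combinations_iff _ _ _).2 ⟨h, rfl⟩⟩
    rw [List.mem_range]
    exact Nat.lt_succ_of_le h.length_le

theorem B_eval (sentence : List String) (n : Int) :
    solution_alt sentence n
      = if ((UK (PySem.Set.ofList sentence)).length : Int) < n then 0
        else (allsubs sentence).foldl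
            (fun best S => if ((UK S).length : Int) ≤ n then max best (tot S) else best) 0 := by
  simp only [solution_alt, PySem.List.dedup_eq_ofList, PySem.List.combinations_map,
    List.foldl_map, List.length_map]
  have hut : ∀ S : List String,
      S.foldl (fun (p : PySem.Set String × Int) s => (PySem.Set.union p.1 (solB_keys s), p.2 + solB_score s))
        (PySem.Set.empty, 0) = (UK S, tot S) := by
    intro S
    rw [PySem.List.foldl_prod_mk
        (f := fun (u : PySem.Set String) s => PySem.Set.union u (solB_keys s))
        (g := fun (t : Int) s => t + solB_score s)]
    have h2 : S.foldl (fun (t : Int) s => t + solB_score s) 0 = tot S := by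
      rw [PySem.List.foldl_add]
      unfold tot
      rw [List.map_congr_left (fun s _ => score_eq s)]
      simp
    rw [h2]
    rfl
  simp only [hut]
  rw [← List.foldl_flatMap]
  rfl

-- the number of distinct keys is the same on both sides
theorem Klen_eq (sentence : List String) :
    (Kset sentence).length = (UK (PySem.Set.ofList sentence)).length := by
  have h1 := nodup_Kset sentence
  have h2 := nodup_UK (PySem.Set.ofList sentence)
  have hperm : (Kset sentence).Perm (UK (PySem.Set.ofList sentence)) := by
    rw [List.perm_ext_iff_of_nodup h1 h2]
    intro x
    rw [mem_Kset, mem_UK]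
    constructor
    · rintro ⟨s, hs, h⟩
      exact ⟨s, (PySem.Set.mem_ofList _ _).2 hs, h⟩
    · rintro ⟨s, hs, h⟩
      exact ⟨s, (PySem.Set.mem_ofList _ _).1 hs, h⟩
  exact hperm.length_eq

-- ===== VERDICT (by name: the statement is the Claim_ definition above) =====
theorem solution_spec : Claim_equal_solution := by
  intro sentence n _ hpre
  unfold Spec_solution
  have hn : 0 ≤ n := hpre
  rw [A_eval, B_eval]
  have hKlen := Klen_eq sentence
  by_cases hg : ((UK (PySem.Set.ofList sentence)).length : Int) < n
  · rw [if_pos hg]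
    have hlt : (Kset sentence).length < n.toNat := by omega
    rw [PySem.List.combinations_eq_nil_of_length_lt _ hlt]
    rw [PySem.Set.ofList_nil]
    rfl
  · rw [if_neg hg]
    apply le_antisymm
    · -- A's maximum is attained by a subset of sentences
      apply foldl_max_le
      · exact cmax_ge_init _ _ _ _
      · intro combi hcombi
        obtain ⟨hsub, hlen⟩ :=
          (PySem.List.mem_combinations_iff _ _ _).1 ((PySem.Set.mem_ofList _ _).1 hcombi)
        have hSmem : (PySem.Set.ofList sentence).filter (fun s => pA combi s) ∈ allsubs sentence := by
          rw [mem_allsubs]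
          exact List.filter_sublist
        have hcond : ((UK ((PySem.Set.ofList sentence).filter (fun s => pA combi s))).length : Int) ≤ n := by
          have hsubUK : ∀ x ∈ UK ((PySem.Set.ofList sentence).filter (fun s => pA combi s)), x ∈ combi := by
            intro x hx
            obtain ⟨s, hsS, hR⟩ := (mem_UK _ _).1 hx
            have hpAs : pA combi s = true := (List.mem_filter.1 hsS).2
            exact (pA_iff combi s).1 hpAs x ((mem_solA_tmp s x).2 hR)
          have hl := nodup_length_le (nodup_UK _) hsubUK
          omega
        exact cmax_ge_mem _ _ _ _ hSmem hcond
    · -- every feasible subset of sentences is dominated by some key tuple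
      apply cmax_le
      · exact (PySem.List.le_foldl_max_int _ _ 0).1
      · intro S hSmem hcond
        have hSsub : S.Sublist (PySem.Set.ofList sentence) := (mem_allsubs _ _).1 hSmem
        have hUKK : ∀ x ∈ UK S, x ∈ Kset sentence := by
          intro x hx
          obtain ⟨s, hsS, hR⟩ := (mem_UK _ _).1 hx
          exact (mem_Kset _ _).2 ⟨s, (PySem.Set.mem_ofList _ _).1 (hSsub.subset hsS), hR⟩
        have hfK : ((Kset sentence).filter (fun y => decide (y ∈ UK S))).Sublist (Kset sentence) :=
          List.filter_sublist
        have hfnd : ((Kset sentence).filter (fun y => decide (y ∈ UK S))).Nodup :=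
          (nodup_Kset sentence).filter _
        have hfsub : ∀ y ∈ (Kset sentence).filter (fun y => decide (y ∈ UK S)), y ∈ UK S := by
          intro y hy
          have := (List.mem_filter.1 hy).2
          simpa using this
        have hflen : ((Kset sentence).filter (fun y => decide (y ∈ UK S))).length ≤ n.toNat := by
          have := nodup_length_le hfnd hfsub
          omega
        have hnK : n.toNat ≤ (Kset sentence).length := by omega
        obtain ⟨t, ht1, ht2, ht3⟩ := sublist_extend hfK n.toNat hflen hnK
        have htmem : t ∈ PySem.Set.ofList (PySem.List.combinations (Kset sentence) n.toNat) :=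
          (PySem.Set.mem_ofList _ _).2 ((PySem.List.mem_combinations_iff _ _ _).2 ⟨ht2, ht3⟩)
        have hcover : ∀ s ∈ S, pA t s = true := by
          intro s hs
          rw [pA_iff]
          intro x hx
          have hxUK : x ∈ UK S := (mem_UK _ _).2 ⟨s, hs, (mem_solA_tmp s x).1 hx⟩
          have hxf : x ∈ (Kset sentence).filter (fun y => decide (y ∈ UK S)) :=
            List.mem_filter.2 ⟨hUKK x hxUK, by simpa using hxUK⟩
          exact ht1.subset hxf
        have hSfilter : S.Sublist ((PySem.Set.ofList sentence).filter (fun s => pA t s)) := by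
          have hself : S.filter (fun s => pA t s) = S := List.filter_eq_self.2 hcover
          have hsf := hSsub.filter (fun s => pA t s)
          rwa [hself] at hsf
        calc tot S ≤ AF sentence t := tot_mono hSfilter
          _ ≤ _ := (PySem.List.le_foldl_max_int _ _ 0).2 t htmem
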